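-- pv_equiv track=rewrite | github.com/ChenziqiAdam/Narrative-Planner | src/agents/planner_agent.py | _strategy_from_slots
-- ===== SOURCE A (Python) =====
-- from typing import Any, Dict, List, Optional
--
-- def _strategy_from_slots(target_slots: List[str]) -> str:
--     if any(slot in {"reflection", "feeling"} for slot in target_slots):
--         return "OBJECT_TO_EMOTION"
--     if any(slot in {"time", "location"} for slot in target_slots):
--         return "TIMELINE_SLOT_FILL"
--     if "people" in target_slots:
--         return "PERSON_CONTEXT_FILL"
--     return "DETAIL_EXPANSION"
-- ===== SOURCE B (Python) =====
-- def _strategy_from_slots(target_slots):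
--     RANK = {"reflection": 0, "feeling": 0, "time": 1, "location": 1, "people": 2}
--     LABELS = ["OBJECT_TO_EMOTION", "TIMELINE_SLOT_FILL", "PERSON_CONTEXT_FILL", "DETAIL_EXPANSION"]
--     best = 3
--     for slot in target_slots:
--         r = RANK.get(slot, 3)
--         if r < best:
--             best = r
--     return LABELS[best]
-- ===== Notes on version B (the rewrite author's own statement) =====
-- stated objective: alternative
-- what changed: Replaces the three separate any()/membership scans and early returns by a single table-driven pass that keeps the minimum priority rank found and maps it back to a label.
import Mathlib
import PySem

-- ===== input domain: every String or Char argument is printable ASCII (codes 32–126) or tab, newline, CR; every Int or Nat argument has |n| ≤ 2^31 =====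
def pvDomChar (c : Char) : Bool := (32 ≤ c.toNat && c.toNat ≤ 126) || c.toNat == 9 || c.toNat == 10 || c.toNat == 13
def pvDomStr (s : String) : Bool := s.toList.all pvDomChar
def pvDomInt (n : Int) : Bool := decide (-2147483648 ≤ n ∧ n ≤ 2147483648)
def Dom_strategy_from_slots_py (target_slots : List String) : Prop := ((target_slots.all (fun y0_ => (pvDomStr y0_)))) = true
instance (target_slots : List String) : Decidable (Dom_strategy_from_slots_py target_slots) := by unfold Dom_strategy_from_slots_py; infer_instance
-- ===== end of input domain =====

-- B replaces A's three any()/membership scans by one table-driven minimum-rank pass (alternative decomposition, same cost).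

-- ===== PORT A =====
def strategy_from_slots_py (target_slots : List String) : String :=
  if target_slots.any (fun slot => slot == "reflection" || slot == "feeling") then
    "OBJECT_TO_EMOTION"
  else if target_slots.any (fun slot => slot == "time" || slot == "location") then
    "TIMELINE_SLOT_FILL"
  else if target_slots.contains "people" then
    "PERSON_CONTEXT_FILL"
  else
    "DETAIL_EXPANSION"

-- ===== PORT B =====
def pvRankDict : PySem.Dict String Int :=
  PySem.Dict.ofList [("reflection", 0), ("feeling", 0), ("time", 1), ("location", 1), ("people", 2)]

def pvLabels : List String :=
  ["OBJECT_TO_EMOTION", "TIMELINE_SLOT_FILL", "PERSON_CONTEXT_FILL", "DETAIL_EXPANSION"]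

def strategy_from_slots_py_alt (target_slots : List String) : String :=
  let best := target_slots.foldl
    (fun best slot =>
      let r := PySem.Dict.getD pvRankDict slot 3
      if r < best then r else best) 3
  (PySem.List.pyGet? pvLabels best).getD ""   -- LABELS[best]; best ∈ [0,3] always, so never the default

-- ===== PRECONDITION & SPEC =====
def Spec_strategy_from_slots_py (target_slots : List String) (out : String) : Prop := out = strategy_from_slots_py_alt target_slots
instance (target_slots : List String) (out : String) : Decidable (Spec_strategy_from_slots_py target_slots out) := by unfold Spec_strategy_from_slots_py; infer_instance

-- ===== CLAIM (what is proved, stated in full; the proofs are below) =====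
def Claim_equal_strategy_from_slots_py : Prop := ∀ (target_slots : List String), Dom_strategy_from_slots_py target_slots → Spec_strategy_from_slots_py target_slots (strategy_from_slots_py target_slots)

-- ===== LEMMAS AND PROOFS =====

def pvRank (s : String) : Int := PySem.Dict.getD pvRankDict s 3

theorem pvRank_eq (s : String) :
    pvRank s = if s = "reflection" ∨ s = "feeling" then 0
      else if s = "time" ∨ s = "location" then 1
      else if s = "people" then 2 else 3 := by
  have hmk : pvRankDict = PySem.Dict.mk
      [("reflection", 0), ("feeling", 0), ("time", 1), ("location", 1), ("people", 2)] := by decide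
  rw [pvRank, hmk]
  simp only [PySem.Dict.getD_eq_get?_getD, PySem.Dict.get?_mk_cons, beq_iff_eq]
  simp only [show ∀ t : String, ("reflection" = t) ↔ t = "reflection" from fun _ => eq_comm,
    show ∀ t : String, ("feeling" = t) ↔ t = "feeling" from fun _ => eq_comm,
    show ∀ t : String, ("time" = t) ↔ t = "time" from fun _ => eq_comm,
    show ∀ t : String, ("location" = t) ↔ t = "location" from fun _ => eq_comm,
    show ∀ t : String, ("people" = t) ↔ t = "people" from fun _ => eq_comm]
  by_cases h1 : s = "reflection" <;> by_cases h2 : s = "feeling" <;>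
    by_cases h3 : s = "time" <;> by_cases h4 : s = "location" <;>
    by_cases h5 : s = "people" <;>
    simp_all [PySem.Dict.get?]

def pvBest (target_slots : List String) : Int :=
  target_slots.foldl (fun best slot => if pvRank slot < best then pvRank slot else best) 3

theorem pvRank_bounds (s : String) : 0 ≤ pvRank s ∧ pvRank s ≤ 3 := by
  rw [pvRank_eq]; split_ifs <;> omega

theorem pvBest_min (ts : List String) (b : Int) (hb : b ≤ 3) :
    ts.foldl (fun best slot => if pvRank slot < best then pvRank slot else best) b
      = min b (pvBest ts) := by
  induction ts generalizing b with
  | nil => simp [pvBest]; omega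
  | cons s ts ih =>
    have hr := pvRank_bounds s
    show List.foldl _ (if pvRank s < b then pvRank s else b) ts = _
    rw [ih _ (by split_ifs <;> omega)]
    have : pvBest (s :: ts)
        = List.foldl (fun best slot => if pvRank slot < best then pvRank slot else best)
            (if pvRank s < 3 then pvRank s else 3) ts := rfl
    rw [this, ih _ (by split_ifs <;> omega)]
    split_ifs at * <;> omega

theorem pvBest_le3 (ts : List String) : pvBest ts ≤ 3 := by
  have := pvBest_min ts 3 le_rfl
  unfold pvBest at *
  omega

theorem pvBest_char (ts : List String) :
    pvBest ts =
      if ts.any (fun slot => slot == "reflection" || slot == "feeling") then 0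
      else if ts.any (fun slot => slot == "time" || slot == "location") then 1
      else if ts.contains "people" then 2 else 3 := by
  induction ts with
  | nil => simp [pvBest]
  | cons s ts ih =>
    have hstep : pvBest (s :: ts) = min (pvRank s) (pvBest ts) := by
      have hr := pvRank_bounds s
      have hb := pvBest_le3 ts
      show List.foldl _ (if pvRank s < 3 then pvRank s else 3) ts = _
      rw [pvBest_min _ _ (by split_ifs <;> omega)]
      split_ifs <;> omega
    rw [hstep, ih, pvRank_eq]
    clear hstep
    simp only [List.any_cons, List.contains_cons, beq_iff_eq, Bool.or_eq_true]
    by_cases h1 : s = "reflection" <;> by_cases h2 : s = "feeling" <;>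
      by_cases h3 : s = "time" <;> by_cases h4 : s = "location" <;>
      by_cases h5 : s = "people" <;>
      simp_all <;> (try split_ifs) <;> (try omega) <;>
        simp_all [show ("people" = s) ↔ s = "people" from eq_comm]

-- ===== VERDICT (by name: the statement is the Claim_ definition above) =====
theorem strategy_from_slots_py_spec : Claim_equal_strategy_from_slots_py := by
  intro ts _
  show strategy_from_slots_py ts = strategy_from_slots_py_alt ts
  have halt : strategy_from_slots_py_alt ts = (PySem.List.pyGet? pvLabels (pvBest ts)).getD "" := rfl
  rw [halt]
  unfold strategy_from_slots_py
  rw [pvBest_char ts]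
  split_ifs <;> rfl
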